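-- pv_equiv track=rewrite | github.com/its-sachin/CodeChef | 25-5/q6.py | func
-- ===== SOURCE A (Python) =====
-- def func(n):
--     c = False
--     o =False
--     d = False
--     e = False
--     E = False
--
--
--     for i in range(len(n)):
--         if (i != 0 and i != len(n)-1):
--             if (n[i]=='e'):
--                 e = True
--             if (n[i] == 'E'):
--                 E =True
--         if (n[i] == 'C'):
--             c = True
--         if (n[i] == 'o'):
--             o = True
--         if (n[i] == 'D'):
--             d = True
--
--     if (c and o and d and e and E):
--         return "SELECTED"
--     return "REJECTED"
-- ===== SOURCE B (Python) =====
-- def func(n):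
--     # Counting approach: a letter is present in the required region iff its
--     # occurrence count, minus occurrences at forbidden boundary positions,
--     # is positive.
--     def has(ch, interior=False):
--         cnt = n.count(ch)
--         if interior:
--             cnt -= n.startswith(ch) + (len(n) > 1 and n.endswith(ch))
--         return cnt > 0
--
--     if has('C') and has('o') and has('D') and has('e', True) and has('E', True):
--         return "SELECTED"
--     return "REJECTED"
-- ===== Notes on version B (the rewrite author's own statement) =====
-- stated objective: faster
-- what changed: Replaces A's indexed flag-setting loop by occurrence-count arithmetic: each letter is tested via n.count(ch) > 0, and the interior-only letters by subtracting boundary occurrences (startswith/endswith) from the total count before comparing with zero.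
import Mathlib
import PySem

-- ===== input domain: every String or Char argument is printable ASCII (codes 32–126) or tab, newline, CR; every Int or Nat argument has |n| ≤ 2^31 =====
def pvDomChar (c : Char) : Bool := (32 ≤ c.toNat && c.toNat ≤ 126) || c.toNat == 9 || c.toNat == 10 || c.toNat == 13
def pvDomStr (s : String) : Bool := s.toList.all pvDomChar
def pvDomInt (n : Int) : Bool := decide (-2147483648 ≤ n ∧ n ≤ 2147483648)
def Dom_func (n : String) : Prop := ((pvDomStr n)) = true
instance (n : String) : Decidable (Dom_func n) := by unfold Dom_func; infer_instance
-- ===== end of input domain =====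

-- B replaces A's indexed flag-setting loop by occurrence-count arithmetic:
-- count(ch) > 0, with boundary occurrences (startswith/endswith) subtracted for
-- the interior-only letters; objective: faster (C-level built-ins replace the
-- per-character Python loop; measured).

-- ===== PORT A =====
-- one loop iteration of A's for-loop over i in range(len(n)) (state (c,o,d,e,E))
def funcStep (l : List Char) (s : Bool × Bool × Bool × Bool × Bool) (i : Nat) :
    Bool × Bool × Bool × Bool × Bool :=
  let (c, o, d, e, E) := s
  let ch := l.getD i ' '
  let e := if i ≠ 0 ∧ i ≠ l.length - 1 then (if ch == 'e' then true else e) else e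
  let E := if i ≠ 0 ∧ i ≠ l.length - 1 then (if ch == 'E' then true else E) else E
  let c := if ch == 'C' then true else c
  let o := if ch == 'o' then true else o
  let d := if ch == 'D' then true else d
  (c, o, d, e, E)

def func (n : String) : String :=
  let l := n.toList
  let st := (List.range l.length).foldl (funcStep l) (false, false, false, false, false)
  if st.1 && st.2.1 && st.2.2.1 && st.2.2.2.1 && st.2.2.2.2 then "SELECTED" else "REJECTED"

-- ===== PORT B =====
-- Source B's helper has(ch, interior): bool arithmetic True+False is Int arithmetic
def funcHas (n : String) (ch : Char) (interior : Bool) : Bool :=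
  let cnt : Int := (PySem.Str.count n (String.ofList [ch]) : Int)
  let cnt := if interior then
      cnt - ((if PySem.Str.startswith n (String.ofList [ch]) then (1 : Int) else 0)
             + (if decide (PySem.Str.len n > 1) && PySem.Str.endswith n (String.ofList [ch])
                then (1 : Int) else 0))
    else cnt
  decide (cnt > 0)

def func_alt (n : String) : String :=
  if funcHas n 'C' false && funcHas n 'o' false && funcHas n 'D' false
      && funcHas n 'e' true && funcHas n 'E' true then "SELECTED" else "REJECTED"

-- ===== PRECONDITION & SPEC =====
def Spec_func (n : String) (out : String) : Prop := out = func_alt n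
instance (n : String) (out : String) : Decidable (Spec_func n out) := by unfold Spec_func; infer_instance

-- ===== CLAIM (what is proved, stated in full; the proofs are below) =====
def Claim_equal_func : Prop := ∀ (n : String), Dom_func n → Spec_func n (func n)

-- ===== LEMMAS AND PROOFS =====

-- predicates tested by A's loop at index i
def pvHit (l : List Char) (a : Char) (i : Nat) : Bool := l.getD i ' ' == a
def pvHitIn (l : List Char) (a : Char) (i : Nat) : Bool :=
  decide (i ≠ 0 ∧ i ≠ l.length - 1) && (l.getD i ' ' == a)

-- A's fold decomposes into five independent boolean "or-any" accumulations
theorem funcStep_foldl (l : List Char) (xs : List Nat) :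
    ∀ c o d e E, xs.foldl (funcStep l) (c, o, d, e, E) =
      (c || xs.any (pvHit l 'C'), o || xs.any (pvHit l 'o'), d || xs.any (pvHit l 'D'),
       e || xs.any (pvHitIn l 'e'), E || xs.any (pvHitIn l 'E')) := by
  induction xs with
  | nil => simp
  | cons x xs ih =>
    intro c o d e E
    simp only [List.foldl_cons, funcStep, List.any_cons, ih]
    refine Prod.ext ?_ (Prod.ext ?_ (Prod.ext ?_ (Prod.ext ?_ ?_))) <;>
      simp [pvHit, pvHitIn] <;>
      by_cases h : x ≠ 0 ∧ x ≠ l.length - 1 <;>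
      rcases hc : (l.getD x ' ' == 'e') <;> rcases hc2 : (l.getD x ' ' == 'E') <;>
      simp [h, Bool.or_comm, Bool.or_left_comm, Bool.beq_eq_decide_eq] <;>
      by_cases h0 : x = 0 <;> simp_all

theorem any_range_hit (l : List Char) (a : Char) :
    (List.range l.length).any (pvHit l a) = l.contains a := by
  rw [Bool.eq_iff_iff]
  simp only [List.any_eq_true, List.mem_range, pvHit, beq_iff_eq,
    List.contains_iff_exists_mem_beq, beq_iff_eq]
  constructor
  · rintro ⟨i, hi, h⟩
    rw [List.getD_eq_getElem l ' ' hi] at h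
    exact ⟨l[i], List.getElem_mem hi, h.symm⟩
  · rintro ⟨x, hx, rfl⟩
    obtain ⟨i, hi, rfl⟩ := List.getElem_of_mem hx
    exact ⟨i, hi, by rw [List.getD_eq_getElem l ' ' hi]⟩

theorem any_range_hitIn (l : List Char) (a : Char) :
    (List.range l.length).any (pvHitIn l a) = ((l.drop 1).take (l.length - 2)).contains a := by
  rw [Bool.eq_iff_iff]
  simp only [List.any_eq_true, List.mem_range, pvHitIn, Bool.and_eq_true, decide_eq_true_eq,
    beq_iff_eq, List.contains_iff_exists_mem_beq]
  constructor
  · rintro ⟨i, hi, ⟨h0, hl⟩, hc⟩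
    have hj : i - 1 < ((l.drop 1).take (l.length - 2)).length := by
      simp [List.length_take]; omega
    refine ⟨_, List.getElem_mem hj, ?_⟩
    have : ((l.drop 1).take (l.length - 2))[i - 1] = l[i] := by
      rw [List.getElem_take, List.getElem_drop]; congr 1; omega
    rw [this, List.getD_eq_getElem l ' ' hi] at *
    simp [hc]
  · rintro ⟨x, hx, hb⟩
    obtain ⟨j, hj, rfl⟩ := List.getElem_of_mem hx
    have hjl : j < l.length - 2 := by
      have := hj; simp [List.length_take] at this; omega
    have h1j : 1 + j < l.length := by omega
    refine ⟨1 + j, h1j, ⟨by omega, by omega⟩, ?_⟩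
    have : ((l.drop 1).take (l.length - 2))[j] = l[1 + j] := by
      rw [List.getElem_take, List.getElem_drop]
    rw [List.getD_eq_getElem l ' ' h1j, ← this]
    exact hb.symm

-- single-character substring count is plain element count
theorem count_go_single (a : Char) :
    ∀ (l : List Char) (fuel acc : Nat), l.length ≤ fuel →
      PySem.Chars.count.go [a] fuel l acc = acc + l.count a := by
  intro l
  induction l with
  | nil => intro fuel acc _; cases fuel <;> simp [PySem.Chars.count.go]
  | cons x xs ih =>
    intro fuel acc hf
    cases fuel with
    | zero => simp at hf
    | succ fuel =>
      have hxs : xs.length ≤ fuel := by simp at hf; omega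
      simp only [PySem.Chars.count.go]
      cases hax : (a == x) with
      | true =>
        have hx : x = a := (beq_iff_eq.mp hax).symm
        subst hx
        simp only [List.isPrefixOf, beq_self_eq_true, Bool.and_true,
          List.length_cons, List.drop_succ_cons, List.length_nil, List.drop_zero, if_true]
        rw [ih fuel (acc + 1) hxs]
        simp
        omega
      | false =>
        have hp : List.isPrefixOf [a] (x :: xs) = false := by
          simp [List.isPrefixOf, hax]
        rw [hp]
        simp only [Bool.false_eq_true, if_false]
        rw [ih fuel acc hxs]
        have hx : ¬x = a := fun h => by subst h; simp at hax
        simp [hx]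

theorem count_single (l : List Char) (a : Char) :
    PySem.Chars.count l [a] = l.count a := by
  simp only [PySem.Chars.count, List.isEmpty_cons, if_false, Bool.false_eq_true]
  simpa using count_go_single a l l.length 0 le_rfl

-- B's plain test: count > 0 is contains
theorem funcHas_false (n : String) (a : Char) :
    funcHas n a false = n.toList.contains a := by
  simp only [funcHas, PySem.Str.count_eq, String.toList_ofList]
  rw [count_single, Bool.eq_iff_iff]
  simp [List.count_pos_iff]

-- B's interior test on the list side: count minus boundary occurrences > 0 is
-- contains on the interior
theorem interior_count (l : List Char) (a : Char) :
    decide (((l.count a : Int)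
        - ((if PySem.Chars.startswith l [a] then (1 : Int) else 0)
           + (if decide ((l.length : Int) > 1) && PySem.Chars.endswith l [a]
              then (1 : Int) else 0))) > 0)
      = ((l.drop 1).take (l.length - 2)).contains a := by
  rcases l with _ | ⟨x, xs⟩
  · simp [PySem.Chars.startswith, PySem.Chars.endswith]
  · rcases hxs : xs.reverse with _ | ⟨b, ys⟩
    · -- length 1: l = [x]
      have : xs = [] := by simpa using congrArg List.reverse hxs
      subst this
      by_cases h : x = a
      · subst h
        simp [PySem.Chars.startswith, PySem.Chars.endswith, List.isPrefixOf]
      · have hax : (a == x) = false := by simp [Ne.symm h]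
        simp [PySem.Chars.startswith, PySem.Chars.endswith, List.isPrefixOf,
          hax, h]
    · -- length ≥ 2: l = x :: m ++ [b]
      obtain ⟨m, b, rfl⟩ : ∃ m c, xs = m ++ [c] :=
        ⟨ys.reverse, b, by have := congrArg List.reverse hxs; simpa using this⟩
      have hsw : PySem.Chars.startswith (x :: (m ++ [b])) [a] = (x == a) := by
        simp [PySem.Chars.startswith, List.isPrefixOf]
        exact eq_comm
      have hew : PySem.Chars.endswith (x :: (m ++ [b])) [a] = (b == a) := by
        simp [PySem.Chars.endswith, List.isSuffixOf, List.reverse_append, List.isPrefixOf]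
        exact eq_comm
      have hint : (((x :: (m ++ [b])).drop 1).take ((x :: (m ++ [b])).length - 2)) = m := by
        simp
      have hlen : decide (((x :: (m ++ [b])).length : Int) > 1) = true := by simp
      rw [hsw, hew, hint, hlen]
      have hcnt : (x :: (m ++ [b])).count a
          = (if x == a then 1 else 0) + m.count a + (if b == a then 1 else 0) := by
        simp only [List.count_cons, List.count_append, List.count_nil]
        omega
      rw [hcnt, Bool.eq_iff_iff]
      simp only [decide_eq_true_eq, Bool.true_and, List.contains_iff_mem]
      rw [← List.count_pos_iff (l := m) (a := a)]
      push_cast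
      split_ifs <;> omega

theorem funcHas_true (n : String) (a : Char) :
    funcHas n a true = ((n.toList.drop 1).take (n.toList.length - 2)).contains a := by
  simp only [funcHas, PySem.Str.count_eq, PySem.Str.startswith_eq, PySem.Str.endswith_eq,
    PySem.Str.len_eq, String.toList_ofList, count_single, if_true]
  exact interior_count n.toList a

theorem func_eq_alt (n : String) : func n = func_alt n := by
  simp only [func, func_alt]
  rw [funcStep_foldl]
  simp only [any_range_hit, any_range_hitIn, Bool.false_or,
    funcHas_false, funcHas_true]

-- ===== VERDICT (by name: the statement is the Claim_ definition above) =====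
theorem func_spec : Claim_equal_func := by
  intro n _
  exact func_eq_alt n
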